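-- pv_equiv track=rewrite | github.com/xigaoli/lc-challenges | 1153. String Transforms Into Another String.py | canConvert
-- ===== SOURCE A (Python) =====
-- def canConvert(str1: str, str2: str) -> bool:
--     #guaranteed len(str1)==len(str2)
--     #need one unused chars
--     m1={}
--     m2={}
--     if(str1==str2):
--         return True
--     for i in range(len(str1)):
--         ch1=str1[i]
--         ch2=str2[i]
--
--         if(ch1 not in m1):  #need ch1->ch2
--             m1[ch1]=ch2
--         elif(m1[ch1]!=ch2):
--             return False    #one char cannot transform to 2 chars
--     #if we want a->b,b->c,c->a, we need at least 1 tmp char to swap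
--     #if we want a->b,b->c, we need less than 26 chars in map(prevent loop)
--     if(len(set(str2))>=26):
--        return False
--     return True
-- ===== SOURCE B (Python) =====
-- def canConvert(str1: str, str2: str) -> bool:
--     # sort-then-scan instead of building a mapping dict: after sorting the
--     # (src, dst) pairs lexicographically, the char map is inconsistent exactly
--     # when some two ADJACENT pairs share the source char but differ in target.
--     if str1 == str2:
--         return True
--     pairs = sorted(zip(str1, str2))
--     for (a, b), (c, d) in zip(pairs, pairs[1:]):
--         if a == c and b != d:
--             return False
--     return len(set(str2)) < 26
-- ===== Notes on version B (the rewrite author's own statement) =====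
-- stated objective: alternative
-- what changed: Replaces A's one-pass dict-building scan over indices by a sort-then-scan algorithm: sort the (src,dst) pairs lexicographically and reject iff two adjacent sorted pairs share the source char with different targets, then the same <26 distinct-target check.
-- outside the precondition, e.g. on canConvert('ab', 'x'): A raises IndexError, B returns True; on canConvert('aab', 'ax'): A returns False, B returns False
import Mathlib
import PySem

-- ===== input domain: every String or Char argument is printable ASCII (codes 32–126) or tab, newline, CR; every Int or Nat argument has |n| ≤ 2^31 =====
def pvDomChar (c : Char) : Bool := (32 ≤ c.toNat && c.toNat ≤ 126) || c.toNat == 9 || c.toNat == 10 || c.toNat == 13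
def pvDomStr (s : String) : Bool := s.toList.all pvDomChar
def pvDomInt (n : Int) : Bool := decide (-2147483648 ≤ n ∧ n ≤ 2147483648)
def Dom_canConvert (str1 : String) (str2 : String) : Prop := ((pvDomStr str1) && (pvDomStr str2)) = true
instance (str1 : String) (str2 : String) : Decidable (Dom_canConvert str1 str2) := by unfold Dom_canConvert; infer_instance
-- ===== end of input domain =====

-- B replaces A's dict-building index scan by sort-then-scan over the (src,dst) pairs (alternative algorithm, same results).

-- ===== PORT A =====
-- the 'for i in range(len(str1))' loop of A: m1 is the dict, early 'return False' on conflict;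
-- after the loop A runs the 'len(set(str2)) >= 26' check, which is the base case here.
def canConvertGo (s1 s2 : List Char) (idx : List Int) (m1 : PySem.Dict Char Char) : Bool :=
  match idx with
  | [] => if 26 ≤ (PySem.Set.ofList s2).length then false else true
  | i :: rest =>
    let ch1 := PySem.List.pyGetD s1 i ' '
    let ch2 := PySem.List.pyGetD s2 i ' '
    if m1.contains ch1 = false then canConvertGo s1 s2 rest (m1.insert ch1 ch2)
    else if m1.get? ch1 ≠ some ch2 then false
    else canConvertGo s1 s2 rest m1

def canConvert (str1 : String) (str2 : String) : Bool :=
  if str1 == str2 then true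
  else canConvertGo str1.toList str2.toList
        (PySem.List.pyRange 0 (PySem.Str.len str1) 1) PySem.Dict.empty

-- ===== PORT B =====
-- the 'for (a,b),(c,d) in zip(pairs, pairs[1:])' loop with its early 'return False';
-- the base case is the trailing 'return len(set(str2)) < 26'.
def scanLoop (s2 : List Char) (zp : List ((Char × Char) × (Char × Char))) : Bool :=
  match zp with
  | [] => decide ((PySem.Set.ofList s2).length < 26)
  | pq :: rest =>
    if pq.1.1 == pq.2.1 && pq.1.2 != pq.2.2 then false else scanLoop s2 rest

def canConvert_alt (str1 : String) (str2 : String) : Bool :=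
  if str1 == str2 then true
  else
    let pairs := PySem.List.sorted2 (List.zip str1.toList str2.toList) Prod.fst Prod.snd
    scanLoop str2.toList (List.zip pairs (PySem.List.slice pairs (some 1) none))

-- ===== PRECONDITION & SPEC =====
-- Pre_ excludes pairs with len(str1) > len(str2) (the problem guarantees equal lengths): there A
-- raises IndexError at the first index past str2 unless an earlier mapping conflict returns False,
-- while B's zip silently truncates.
def Pre_canConvert (str1 : String) (str2 : String) : Prop :=
  str1.toList.length ≤ str2.toList.length
instance (str1 : String) (str2 : String) : Decidable (Pre_canConvert str1 str2) := by
  unfold Pre_canConvert; infer_instance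

def pvWitness_canConvert : String × String := ("ab", "cd")

def Spec_canConvert (str1 : String) (str2 : String) (out : Bool) : Prop := out = canConvert_alt str1 str2
instance (str1 : String) (str2 : String) (out : Bool) : Decidable (Spec_canConvert str1 str2 out) := by unfold Spec_canConvert; infer_instance

-- ===== CLAIM (what is proved, stated in full; the proofs are below) =====
def Claim_equal_canConvert : Prop := ∀ (str1 : String) (str2 : String), Dom_canConvert str1 str2 → Pre_canConvert str1 str2 → Spec_canConvert str1 str2 (canConvert str1 str2)

-- ===== LEMMAS AND PROOFS =====

-- B-side view of A's loop: the same branches, driven by the list of (src, dst) pairs.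
def goP (s2 : List Char) (ps : List (Char × Char)) (m1 : PySem.Dict Char Char) : Bool :=
  match ps with
  | [] => if 26 ≤ (PySem.Set.ofList s2).length then false else true
  | (a, b) :: rest =>
    if m1.contains a = false then goP s2 rest (m1.insert a b)
    else if m1.get? a ≠ some b then false
    else goP s2 rest m1

-- boolean form of "the pair list is a function of its first components"
def ffB (l : List (Char × Char)) : Bool :=
  l.all (fun p => l.all (fun q => p.1 != q.1 || p.2 == q.2))

lemma ffB_iff (l : List (Char × Char)) :
    ffB l = true ↔ ∀ a b b', (a, b) ∈ l → (a, b') ∈ l → b = b' := by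
  simp only [ffB, List.all_eq_true, bne_iff_ne, Bool.or_eq_true, beq_iff_eq, ne_eq]
  constructor
  · intro h a b b' h1 h2
    rcases h _ h1 _ h2 with h' | h'
    · exact absurd rfl h'
    · exact h'
  · rintro h ⟨a, b⟩ hp ⟨c, d⟩ hq
    by_cases he : a = c
    · subst he; exact Or.inr (h a b d hp hq)
    · exact Or.inl he

lemma ffB_congr {x y : List (Char × Char)} (hxy : ∀ p, p ∈ x ↔ p ∈ y) : ffB x = ffB y := by
  rw [Bool.eq_iff_iff, ffB_iff, ffB_iff]
  constructor <;> intro h a b b' h1 h2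
  · exact h a b b' ((hxy _).mpr h1) ((hxy _).mpr h2)
  · exact h a b b' ((hxy _).mp h1) ((hxy _).mp h2)

lemma dict_contains_isSome (m : PySem.Dict Char Char) (k : Char) :
    m.contains k = (m.get? k).isSome := by
  rw [Bool.eq_iff_iff]
  simp [PySem.Dict.contains, PySem.Dict.get?, List.any_eq_true, List.find?_isSome]

-- A's index loop equals the pair-list loop when str2 is long enough.
lemma go_pairs (s1 s2 : List Char) (h : s1.length ≤ s2.length) :
    ∀ (n k : Nat), s1.length - k ≤ n → ∀ m,
      canConvertGo s1 s2 (PySem.List.pyRange (k : Int) (s1.length : Int) 1) m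
        = goP s2 ((s1.zip s2).drop k) m := by
  intro n
  induction n with
  | zero =>
    intro k hk m
    rw [PySem.List.pyRange_one_eq_nil (by exact_mod_cast (by omega : s1.length ≤ k)),
      List.drop_eq_nil_of_le (by rw [List.length_zip]; omega)]
    rfl
  | succ n ih =>
    intro k hk m
    by_cases hlt : k < s1.length
    · rw [PySem.List.pyRange_one_cons (by exact_mod_cast hlt)]
      have hz : k < (s1.zip s2).length := by rw [List.length_zip]; omega
      rw [List.drop_eq_getElem_cons hz]
      have h1 : PySem.List.pyGetD s1 (k : Int) ' ' = ((s1.zip s2)[k]'hz).1 := by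
        rw [PySem.List.pyGetD_natCast, List.getD_eq_getElem s1 ' ' hlt]
        simp [List.getElem_zip]
      have h2 : PySem.List.pyGetD s2 (k : Int) ' ' = ((s1.zip s2)[k]'hz).2 := by
        rw [PySem.List.pyGetD_natCast, List.getD_eq_getElem s2 ' ' (by omega)]
        simp [List.getElem_zip]
      have hcast : (k : Int) + 1 = ((k + 1 : Nat) : Int) := by push_cast; ring
      simp only [canConvertGo, goP, h1, h2, hcast, List.get_eq_getElem]
      by_cases hc : m.contains ((s1.zip s2)[k]'hz).1 = false
      · rw [if_pos hc, if_pos hc]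
        exact ih (k + 1) (by omega) _
      · rw [if_neg hc, if_neg hc]
        by_cases hv : m.get? ((s1.zip s2)[k]'hz).1 ≠ some ((s1.zip s2)[k]'hz).2
        · rw [if_pos hv, if_pos hv]
        · rw [if_neg hv, if_neg hv]
          exact ih (k + 1) (by omega) m
    · rw [PySem.List.pyRange_one_eq_nil (by exact_mod_cast (by omega : s1.length ≤ k)),
        List.drop_eq_nil_of_le (by rw [List.length_zip]; omega)]
      rfl

-- the pair-list loop computes the consistency test (ffB) of seen-so-far ++ rest
lemma goP_eq (s2 : List Char) :
    ∀ (ps : List (Char × Char)) (m : PySem.Dict Char Char) (S : List (Char × Char)),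
      (∀ a b, m.get? a = some b ↔ (a, b) ∈ S) →
      goP s2 ps m
        = (ffB (S ++ ps) && (if 26 ≤ (PySem.Set.ofList s2).length then false else true)) := by
  intro ps
  induction ps with
  | nil =>
    intro m S hinv
    have hS : ffB (S ++ []) = true := by
      rw [List.append_nil]
      refine (ffB_iff S).mpr (fun a b b' h1 h2 => ?_)
      have e1 := (hinv a b).mpr h1
      have e2 := (hinv a b').mpr h2
      rw [e1] at e2
      exact Option.some.inj e2
    simp only [goP]
    rw [hS, Bool.true_and]
  | cons p ps ih =>
    intro m S hinv
    obtain ⟨a, b⟩ := p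
    by_cases hc : m.contains a = false
    · have hnone : m.get? a = none := by
        have hco := dict_contains_isSome m a
        rw [hc] at hco
        exact Option.not_isSome_iff_eq_none.mp (by rw [← hco]; simp)
      have hinv' : ∀ x y, (m.insert a b).get? x = some y ↔ (x, y) ∈ S ++ [(a, b)] := by
        intro x y
        by_cases hxa : x = a
        · rw [hxa, PySem.Dict.get?_insert_self]
          simp only [List.mem_append, List.mem_singleton, Option.some.injEq, Prod.mk.injEq,
            true_and]
          constructor
          · intro hyb; exact Or.inr hyb.symm
          · rintro (hS' | he)
            · exact absurd ((hinv a y).mpr hS') (by simp [hnone])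
            · exact he.symm
        · rw [PySem.Dict.get?_insert_of_ne _ _ hxa, hinv x y]
          simp only [List.mem_append, List.mem_singleton, Prod.mk.injEq]
          constructor
          · exact Or.inl
          · rintro (hS' | ⟨hx, _⟩)
            · exact hS'
            · exact absurd hx hxa
      simp only [goP]
      rw [if_pos hc, ih _ _ hinv']
      congr 1
      apply ffB_congr
      intro p
      simp only [List.mem_append, List.mem_cons]
      tauto
    · have hsome : ∃ b', m.get? a = some b' := by
        have hco := dict_contains_isSome m a
        have : m.contains a = true := by cases hcc : m.contains a <;> simp_all
        rw [this] at hco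
        exact Option.isSome_iff_exists.mp hco.symm
      obtain ⟨b', hb'⟩ := hsome
      have hmem : (a, b') ∈ S := (hinv a b').mp hb'
      by_cases hv : m.get? a ≠ some b
      · have hbne : b' ≠ b := fun hbb => hv (hbb ▸ hb')
        have hff : ffB (S ++ (a, b) :: ps) = false := by
          cases hf : ffB (S ++ (a, b) :: ps)
          · rfl
          · exact absurd ((ffB_iff _).mp hf a b' b (by simp [hmem]) (by simp)) hbne
        simp only [goP]
        rw [if_neg hc, if_pos hv, hff, Bool.false_and]
      · have hv' : m.get? a = some b := not_not.mp hv
        have hSab : (a, b) ∈ S := (hinv a b).mp hv'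
        simp only [goP]
        rw [if_neg hc, if_neg hv, ih m S hinv]
        congr 1
        apply ffB_congr
        intro p
        constructor
        · intro hp
          rcases List.mem_append.mp hp with hS' | hps
          · exact List.mem_append.mpr (Or.inl hS')
          · exact List.mem_append.mpr (Or.inr (List.mem_cons_of_mem _ hps))
        · intro hp
          rcases List.mem_append.mp hp with hS' | hcons
          · exact List.mem_append.mpr (Or.inl hS')
          · rcases List.mem_cons.mp hcons with he | hps
            · exact List.mem_append.mpr (Or.inl (by rw [he]; exact hSab))
            · exact List.mem_append.mpr (Or.inr hps)

-- ===== B-side lemmas: sort-then-scan detects exactly the ffB failures =====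

-- lexicographic ≤ on the pairs, as used below
def lexLE (p q : Char × Char) : Prop := p.1 < q.1 ∨ (p.1 = q.1 ∧ p.2 ≤ q.2)

-- sorted2 with fst/snd keys is the insertion sort by the lexicographic key
lemma sorted2_eq_lexsort (xs : List (Char × Char)) :
    PySem.List.sorted2 xs Prod.fst Prod.snd
      = xs.foldl (fun acc x =>
          PySem.List.insertBy
            (fun a b => decide ((toLex a : Lex (Char × Char)) < toLex b)) x acc) [] := by
  have hb : (fun a b : Char × Char =>
        decide (a.1 < b.1) || (!decide (b.1 < a.1) && decide (a.2 < b.2)))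
      = (fun a b => decide ((toLex a : Lex (Char × Char)) < toLex b)) := by
    funext a b
    rw [Bool.eq_iff_iff]
    simp only [Bool.or_eq_true, Bool.and_eq_true, Bool.not_eq_true', decide_eq_true_eq,
      decide_eq_false_iff_not, Prod.Lex.lt_iff, ofLex_toLex]
    constructor
    · rintro (h | ⟨h1, h2⟩)
      · exact Or.inl h
      · rcases lt_trichotomy a.1 b.1 with h' | h' | h'
        · exact Or.inl h'
        · exact Or.inr ⟨h', h2⟩
        · exact absurd h' h1
    · rintro (h | ⟨h1, h2⟩)
      · exact Or.inl h
      · exact Or.inr ⟨fun hh => absurd hh (by rw [h1]; exact lt_irrefl _), h2⟩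
  simp only [PySem.List.sorted2, if_neg (by simp : ¬ (false = true))]
  rw [hb]

-- sorted2 output is pairwise lexicographically ordered
lemma lexsort_pairwise (xs : List (Char × Char)) :
    ∀ acc : List (Char × Char),
      acc.Pairwise (fun a b => (toLex a : Lex (Char × Char)) ≤ toLex b) →
      (xs.foldl (fun acc x =>
          PySem.List.insertBy
            (fun a b => decide ((toLex a : Lex (Char × Char)) < toLex b)) x acc) acc).Pairwise
        (fun a b => (toLex a : Lex (Char × Char)) ≤ toLex b) := by
  induction xs with
  | nil => intro acc h; exact h
  | cons x xs ih =>
    intro acc h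
    exact ih _ (PySem.List.insertBy_pairwise_le (fun p => (toLex p : Lex (Char × Char))) x acc h)

-- the adjacent scan over a lex-sorted pair list computes ffB (and then the <26 test)
lemma scan_eq (s2 : List Char) :
    ∀ l : List (Char × Char), l.Pairwise lexLE →
      scanLoop s2 (List.zip l l.tail)
        = (ffB l && decide ((PySem.Set.ofList s2).length < 26)) := by
  intro l
  induction l with
  | nil =>
    intro _
    have : ffB ([] : List (Char × Char)) = true := rfl
    simp [scanLoop, this]
  | cons p t ih =>
    intro hp
    cases t with
    | nil =>
      have hf : ffB [p] = true := by
        simp [ffB]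
      simp [scanLoop, hf]
    | cons q rest =>
      have hpq : lexLE p q := (List.pairwise_cons.mp hp).1 q (List.mem_cons_self ..)
      have hpt : ∀ r ∈ q :: rest, lexLE p r := (List.pairwise_cons.mp hp).1
      have htail : (q :: rest).Pairwise lexLE := (List.pairwise_cons.mp hp).2
      have hqr : ∀ r ∈ rest, lexLE q r := (List.pairwise_cons.mp htail).1
      have hstep : List.zip (p :: q :: rest) (p :: q :: rest).tail
          = (p, q) :: List.zip (q :: rest) (q :: rest).tail := rfl
      rw [hstep]
      simp only [scanLoop]
      by_cases hcf : p.1 = q.1 ∧ p.2 ≠ q.2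
      · rw [if_pos (by simp [hcf.1, hcf.2])]
        have hff : ffB (p :: q :: rest) = false := by
          cases hf : ffB (p :: q :: rest)
          · rfl
          · exfalso
            have := (ffB_iff _).mp hf p.1 p.2 q.2
              (by simp) (by rw [hcf.1]; simp)
            exact hcf.2 this
        rw [hff, Bool.false_and]
      · rw [if_neg (by
          simp only [Bool.and_eq_true, beq_iff_eq, bne_iff_ne, ne_eq, not_and]
          intro h1 h2; exact hcf ⟨h1, h2⟩)]
        rw [ih htail]
        congr 1
        -- ffB (p :: q :: rest) = ffB (q :: rest) in this branch
        rw [Bool.eq_iff_iff, ffB_iff, ffB_iff]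
        constructor
        · intro h a b b' h1 h2
          -- helper: any tail element with fst = p.1 forces p.1 = q.1
          have hfst : ∀ r ∈ q :: rest, p.1 ≤ r.1 := by
            intro r hr
            rcases hpt r hr with h' | h'
            · exact le_of_lt h'
            · exact le_of_eq h'.1
          have hqfst : ∀ r ∈ q :: rest, q.1 ≤ r.1 := by
            intro r hr
            rcases List.mem_cons.mp hr with he | hm
            · exact le_of_eq (by rw [he])
            · rcases hqr r hm with h' | h'
              · exact le_of_lt h'
              · exact le_of_eq h'.1
          -- if p.1 ≠ q.1, no tail element has fst = p.1
          have hkey : ∀ c, (p.1 = c) → ∀ r ∈ q :: rest, r.1 = c → p.1 = q.1 := by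
            intro c hc r hr hrc
            have h1' : p.1 ≤ q.1 := hfst q (List.mem_cons_self ..)
            have h2' : q.1 ≤ r.1 := hqfst r hr
            have : p.1 = r.1 := by rw [hc, hrc]
            exact le_antisymm h1' (by rw [this]; exact h2')
          rcases List.mem_cons.mp h1 with e1 | m1 <;> rcases List.mem_cons.mp h2 with e2 | m2
          · -- both are p
            have hb : b = p.2 := congrArg Prod.snd e1
            have hb' : b' = p.2 := congrArg Prod.snd e2
            rw [hb, hb']
          · -- (a,b) = p, (a,b') in tail
            have ha : p.1 = a := by rw [← e1]
            have hpq1 : p.1 = q.1 := hkey a ha (a, b') m2 rfl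
            have hp2q2 : p.2 = q.2 := by
              by_contra hne
              exact hcf ⟨hpq1, hne⟩
            -- p = q as a pair, so (a,b) = q ∈ tail
            have hpq' : p = q := Prod.ext hpq1 hp2q2
            exact h a b b' (by
              have : q = (a, b) := by rw [← hpq', e1]
              rw [← this]; exact List.mem_cons_self ..) m2
          · have ha : p.1 = a := by rw [← e2]
            have hpq1 : p.1 = q.1 := hkey a ha (a, b) m1 rfl
            have hp2q2 : p.2 = q.2 := by
              by_contra hne
              exact hcf ⟨hpq1, hne⟩
            have hpq' : p = q := Prod.ext hpq1 hp2q2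
            exact h a b b' m1 (by
              have : q = (a, b') := by rw [← hpq', e2]
              rw [← this]; exact List.mem_cons_self ..)
          · exact h a b b' m1 m2
        · intro h a b b' h1 h2
          exact h a b b' (List.mem_cons_of_mem _ h1) (List.mem_cons_of_mem _ h2)

-- ===== VERDICT (by name: the statement is the Claim_ definition above) =====
theorem canConvert_spec : Claim_equal_canConvert := by
  intro str1 str2 _ hpre
  unfold Spec_canConvert canConvert canConvert_alt
  cases heq : (str1 == str2)
  · rw [if_neg (by simp : ¬ (false = true)), if_neg (by simp : ¬ (false = true))]
    have h12 : str1.toList.length ≤ str2.toList.length := hpre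
    rw [PySem.Str.len_eq]
    have hgo := go_pairs str1.toList str2.toList h12 str1.toList.length 0 (by omega)
      PySem.Dict.empty
    simp only [Nat.cast_zero, List.drop_zero] at hgo
    rw [hgo]
    rw [goP_eq str2.toList (str1.toList.zip str2.toList) PySem.Dict.empty []
      (by intro a b; simp [PySem.Dict.get?, PySem.Dict.empty])]
    rw [List.nil_append]
    -- B side
    show _ = scanLoop str2.toList
      ((PySem.List.sorted2 (str1.toList.zip str2.toList) Prod.fst Prod.snd).zip
        (PySem.List.slice (PySem.List.sorted2 (str1.toList.zip str2.toList) Prod.fst Prod.snd)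
          (some 1)))
    rw [PySem.List.slice_from_one]
    set zs := str1.toList.zip str2.toList with hzs
    have hperm : (PySem.List.sorted2 zs Prod.fst Prod.snd).Perm zs :=
      PySem.List.sorted2_perm zs Prod.fst Prod.snd false
    have hpw : (PySem.List.sorted2 zs Prod.fst Prod.snd).Pairwise lexLE := by
      rw [sorted2_eq_lexsort]
      refine (lexsort_pairwise zs [] (List.Pairwise.nil)).imp ?_
      intro a b hab
      rcases Prod.Lex.le_iff.mp hab with h' | h'
      · exact Or.inl h'
      · exact Or.inr h'
    rw [scan_eq str2.toList _ hpw]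
    have hffeq : ffB (PySem.List.sorted2 zs Prod.fst Prod.snd) = ffB zs :=
      ffB_congr (fun p => hperm.mem_iff)
    rw [hffeq]
    congr 1
    by_cases h26 : 26 ≤ (PySem.Set.ofList str2.toList).length
    · rw [if_pos h26]
      exact ((decide_eq_false (by omega)).symm)
    · rw [if_neg h26]
      exact (decide_eq_true (by omega)).symm
  · simp
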